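-- pv_equiv track=rewrite | github.com/mozillazg/pypy | pypy/rlib/rstr.py | str_replace
-- ===== SOURCE A (Python) =====
-- def str_replace(input, sub, by, maxsplit=-1):
--     if maxsplit == 0:
--         return input
--
--     #print "from replace, input: %s, sub: %s, by: %s" % (input, sub, by)
--
--     if not sub:
--         upper = len(input)
--         if maxsplit > 0 and maxsplit < upper + 2:
--             upper = maxsplit - 1
--             assert upper >= 0
--         substrings = [""]
--         for i in range(upper):
--             c = input[i]
--             substrings.append(c)
--         substrings.append(input[upper:])
--         return by.join(substrings)
--     startidx = 0
--     substrings = []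
--     foundidx = input.find(sub, startidx)
--     while foundidx >= 0 and maxsplit != 0:
--         substrings.append(input[startidx:foundidx])
--         startidx = foundidx + len(sub)
--         foundidx = input.find(sub, startidx)
--         maxsplit = maxsplit - 1
--     substrings.append(input[startidx:])
--     return by.join(substrings)
-- ===== SOURCE B (Python) =====
-- def str_replace(input, sub, by, maxsplit=-1):
--     if maxsplit == 0:
--         return input
--
--     if not sub:
--         upper = len(input)
--         if 0 < maxsplit < upper + 2:
--             upper = maxsplit - 1
--         return by + by.join(list(input[:upper]) + [input[upper:]])
--
--     n, m = len(input), len(sub)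
--     out = []
--     i = 0
--     k = maxsplit
--     while i < n:
--         if k != 0 and input[i:i + m] == sub:
--             out.append(by)
--             i += m
--             k -= 1
--         else:
--             out.append(input[i])
--             i += 1
--     return "".join(out)
-- ===== Notes on version B (the rewrite author's own statement) =====
-- stated objective: alternative
-- what changed: The find/split/join loop of A is replaced by a single left-to-right scan that at each index tests whether sub starts there and either emits the replacement (decrementing the remaining-replacements counter) or the single character; the empty-sub branch is expressed as by + by.join(chars + [tail]) instead of joining an explicit list that starts with ''.
import Mathlib
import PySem

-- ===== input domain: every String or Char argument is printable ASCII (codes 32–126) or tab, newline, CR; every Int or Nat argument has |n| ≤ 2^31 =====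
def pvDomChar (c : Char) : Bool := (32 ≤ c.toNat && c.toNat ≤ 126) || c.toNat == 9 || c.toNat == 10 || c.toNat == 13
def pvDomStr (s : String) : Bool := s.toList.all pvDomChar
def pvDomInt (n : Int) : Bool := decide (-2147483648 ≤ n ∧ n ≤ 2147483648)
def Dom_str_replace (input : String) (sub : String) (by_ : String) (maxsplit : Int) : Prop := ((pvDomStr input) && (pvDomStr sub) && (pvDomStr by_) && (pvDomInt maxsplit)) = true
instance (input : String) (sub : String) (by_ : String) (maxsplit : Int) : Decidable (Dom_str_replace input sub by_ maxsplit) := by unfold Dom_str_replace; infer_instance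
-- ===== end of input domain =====

-- B replaces A's find/split/join loop by a single left-to-right scan emitting the
-- replacement at each match site; same results, similar cost (objective: alternative).

-- ===== PORT A =====
-- A's while loop: find sub from startidx, cut out the piece before it, step past it,
-- decrement maxsplit, until no match or maxsplit hits 0; hs/hst are proof arguments
-- used only for termination.
def strReplaceFindLoop (l sub : List Char) (hs : sub ≠ []) (start : Nat) (hst : start ≤ l.length) (ms : Int) : List (List Char) :=
  if hf : 0 ≤ PySem.Chars.findFrom l sub (start : Int) none ∧ ms ≠ 0 then
    have hne : PySem.Chars.findFrom l sub (start : Int) none ≠ -1 := by omega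
    have hpre : sub <+: l.drop (PySem.Chars.findFrom l sub (start : Int) none).toNat :=
      (PySem.Chars.findFrom_natCast_spec l sub start hst hne).2.1
    have hb : (PySem.Chars.findFrom l sub (start : Int) none).toNat + sub.length ≤ l.length := by
      have h1 := hpre.length_le
      have h2 : 0 < sub.length := List.length_pos_of_ne_nil hs
      simp only [List.length_drop] at h1
      omega
    PySem.List.slice l (some (start : Int)) (some (PySem.Chars.findFrom l sub (start : Int) none)) ::
      strReplaceFindLoop l sub hs ((PySem.Chars.findFrom l sub (start : Int) none).toNat + sub.length) hb (ms - 1)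
  else
    [PySem.List.slice l (some (start : Int)) none]
termination_by l.length - start
decreasing_by
  have hsp := (PySem.Chars.findFrom_natCast_spec l sub start hst hne).1
  have h2 : 0 < sub.length := List.length_pos_of_ne_nil hs
  omega

def str_replace (input : String) (sub : String) (by_ : String) (maxsplit : Int) : String :=
  if maxsplit = 0 then input
  else if hsub : sub.toList = [] then
    -- empty-sub branch: upper is a Nat (the Python assert guarantees upper >= 0, so toNat is exact);
    -- the range(upper) loop over input[i] is the map below (i < upper ≤ len, so getD is exact)
    String.ofList (PySem.Chars.join by_.toList
      (([([] : List Char)] ++ (List.range (if 0 < maxsplit ∧ maxsplit < (input.toList.length : Int) + 2 then (maxsplit - 1).toNat else input.toList.length)).map (fun i => [input.toList.getD i ' '])) ++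
        [input.toList.drop (if 0 < maxsplit ∧ maxsplit < (input.toList.length : Int) + 2 then (maxsplit - 1).toNat else input.toList.length)]))
  else
    String.ofList (PySem.Chars.join by_.toList (strReplaceFindLoop input.toList sub.toList hsub 0 (Nat.zero_le _) maxsplit))

-- ===== PORT B =====
-- B's scan: walk i over input; when replacements remain (k ≠ 0) and input[i:i+m] == sub,
-- emit by_ and jump by m, else emit input[i] (i < len, so getD is exact); hs is a proof
-- argument used only for termination.
def strReplaceScan (l sub by_ : List Char) (hs : sub ≠ []) (i : Nat) (k : Int) : List Char :=
  if hi : i < l.length then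
    if k ≠ 0 ∧ PySem.List.slice l (some (i : Int)) (some ((i : Int) + (sub.length : Int))) = sub then
      by_ ++ strReplaceScan l sub by_ hs (i + sub.length) (k - 1)
    else
      l.getD i ' ' :: strReplaceScan l sub by_ hs (i + 1) k
  else []
termination_by l.length - i
decreasing_by
  · have h2 : 0 < sub.length := List.length_pos_of_ne_nil hs
    omega
  · omega

def str_replace_alt (input : String) (sub : String) (by_ : String) (maxsplit : Int) : String :=
  if maxsplit = 0 then input
  else if hsub : sub.toList = [] then
    String.ofList (by_.toList ++ PySem.Chars.join by_.toList
      ((input.toList.take (if 0 < maxsplit ∧ maxsplit < (input.toList.length : Int) + 2 then (maxsplit - 1).toNat else input.toList.length)).map (fun c => [c]) ++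
        [input.toList.drop (if 0 < maxsplit ∧ maxsplit < (input.toList.length : Int) + 2 then (maxsplit - 1).toNat else input.toList.length)]))
  else
    String.ofList (strReplaceScan input.toList sub.toList by_.toList hsub 0 maxsplit)

-- ===== PRECONDITION & SPEC =====
def Spec_str_replace (input : String) (sub : String) (by_ : String) (maxsplit : Int) (out : String) : Prop := out = str_replace_alt input sub by_ maxsplit
instance (input : String) (sub : String) (by_ : String) (maxsplit : Int) (out : String) : Decidable (Spec_str_replace input sub by_ maxsplit out) := by unfold Spec_str_replace; infer_instance

-- ===== CLAIM (what is proved, stated in full; the proofs are below) =====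
def Claim_equal_str_replace : Prop := ∀ (input : String) (sub : String) (by_ : String) (maxsplit : Int), Dom_str_replace input sub by_ maxsplit → Spec_str_replace input sub by_ maxsplit (str_replace input sub by_ maxsplit)

-- ===== LEMMAS AND PROOFS =====

theorem join_cons_of_ne_nil (sep : List Char) (a : List Char) (rest : List (List Char)) (h : rest ≠ []) :
    PySem.Chars.join sep (a :: rest) = a ++ sep ++ PySem.Chars.join sep rest := by
  cases rest with
  | nil => exact absurd rfl h
  | cons b t => rw [PySem.Chars.join_cons_cons]

theorem range_map_getD (l : List Char) (d : Char) (u : Nat) (hu : u ≤ l.length) :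
    (List.range u).map (fun i => l.getD i d) = l.take u := by
  induction u with
  | zero => simp
  | succ k ih =>
    rw [List.range_succ, List.map_append, ih (by omega), List.take_add_one]
    simp [List.getElem?_eq_getElem (show k < l.length by omega)]

theorem scan_zero (l sub by_ : List Char) (hs : sub ≠ []) (i : Nat) :
    strReplaceScan l sub by_ hs i 0 = l.drop i := by
  rw [strReplaceScan]
  by_cases hi : i < l.length
  · rw [dif_pos hi, if_neg (by simp)]
    rw [scan_zero l sub by_ hs (i + 1)]
    rw [List.drop_eq_getElem_cons hi, List.getD_eq_getElem l ' ' hi]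
  · rw [dif_neg hi, List.drop_eq_nil_of_le (by omega)]
termination_by l.length - i

theorem test_iff (l sub : List Char) (i : Nat) :
    (PySem.List.slice l (some (i : Int)) (some ((i : Int) + (sub.length : Int))) = sub) ↔ sub <+: l.drop i := by
  rw [PySem.List.slice_natCast_add, List.prefix_iff_eq_take, eq_comm]

theorem scan_nomatch (l sub by_ : List Char) (hs : sub ≠ []) (i : Nat) (k : Int)
    (hno : ¬ sub <:+: l.drop i) : strReplaceScan l sub by_ hs i k = l.drop i := by
  rw [strReplaceScan]
  by_cases hi : i < l.length
  · rw [dif_pos hi, if_neg, scan_nomatch l sub by_ hs (i + 1) k,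
      List.drop_eq_getElem_cons hi, List.getD_eq_getElem l ' ' hi]
    · intro hinf
      apply hno
      have hsuf : l.drop (i + 1) <:+ l.drop i := by
        rw [List.drop_eq_getElem_cons hi]
        exact List.suffix_cons _ _
      exact hinf.trans hsuf.isInfix
    · rintro ⟨-, ht⟩
      exact hno ((test_iff l sub i |>.mp ht).isInfix)
  · rw [dif_neg hi, List.drop_eq_nil_of_le (by omega)]
termination_by l.length - i

theorem scan_run (l sub by_ : List Char) (hs : sub ≠ []) (i f : Nat) (k : Int)
    (hif : i ≤ f) (hfl : f ≤ l.length) (hno : ∀ j, i ≤ j → j < f → ¬ sub <+: l.drop j) :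
    strReplaceScan l sub by_ hs i k = (l.drop i).take (f - i) ++ strReplaceScan l sub by_ hs f k := by
  rcases Nat.eq_or_lt_of_le hif with heq | hlt
  · subst heq; simp
  · have hi : i < l.length := by omega
    rw [strReplaceScan, dif_pos hi, if_neg]
    · rw [scan_run l sub by_ hs (i + 1) f k (by omega) hfl
        (fun j h1 h2 => hno j (by omega) h2)]
      rw [List.drop_eq_getElem_cons hi, List.getD_eq_getElem l ' ' hi]
      have : f - i = (f - (i + 1)) + 1 := by omega
      rw [this, List.take_succ_cons, List.cons_append]
    · rintro ⟨-, ht⟩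
      exact hno i le_rfl hlt ((test_iff l sub i).mp ht)
termination_by f - i

theorem findLoop_ne_nil (l sub : List Char) (hs : sub ≠ []) (start : Nat) (hst : start ≤ l.length) (ms : Int) :
    strReplaceFindLoop l sub hs start hst ms ≠ [] := by
  rw [strReplaceFindLoop]
  split <;> simp

theorem loop_eq (l sub by_ : List Char) (hs : sub ≠ []) (start : Nat) (hst : start ≤ l.length) (ms : Int) :
    PySem.Chars.join by_ (strReplaceFindLoop l sub hs start hst ms) = strReplaceScan l sub by_ hs start ms := by
  have hm : 0 < sub.length := List.length_pos_of_ne_nil hs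
  rw [strReplaceFindLoop]
  split
  case isTrue hf =>
    have hne : PySem.Chars.findFrom l sub (start : Int) none ≠ -1 := by omega
    have hspec := PySem.Chars.findFrom_natCast_spec l sub start hst hne
    have hFn : (PySem.Chars.findFrom l sub (start : Int) none).toNat + sub.length ≤ l.length := by
      have h1 := hspec.2.1.length_le
      simp only [List.length_drop] at h1
      omega
    have hsF : start ≤ (PySem.Chars.findFrom l sub (start : Int) none).toNat := by
      have := hspec.1; omega
    have hstep : strReplaceScan l sub by_ hs (PySem.Chars.findFrom l sub (start : Int) none).toNat ms =
        by_ ++ strReplaceScan l sub by_ hs ((PySem.Chars.findFrom l sub (start : Int) none).toNat + sub.length) (ms - 1) := by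
      rw [strReplaceScan, dif_pos (show (PySem.Chars.findFrom l sub (start : Int) none).toNat < l.length by omega),
        if_pos ⟨hf.2, (test_iff l sub _).mpr hspec.2.1⟩]
    rw [join_cons_of_ne_nil _ _ _ (findLoop_ne_nil l sub hs _ _ _)]
    rw [loop_eq l sub by_ hs _ hFn (ms - 1)]
    rw [scan_run l sub by_ hs start ((PySem.Chars.findFrom l sub (start : Int) none).toNat) ms
      hsF (by omega) (fun j h1 h2 => hspec.2.2 j h1 h2), hstep]
    have hcast : PySem.Chars.findFrom l sub (start : Int) none =
        (((PySem.Chars.findFrom l sub (start : Int) none).toNat : Nat) : Int) :=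
      (Int.toNat_of_nonneg hf.1).symm
    rw [hcast, PySem.List.slice_natCast]
    simp [List.append_assoc]
    omega
  case isFalse hf =>
    rw [PySem.Chars.join_singleton, PySem.List.slice_from_natCast]
    by_cases hms : ms = 0
    · subst hms; rw [scan_zero]
    · have hFneg : PySem.Chars.findFrom l sub (start : Int) none = -1 := by
        have hcases := PySem.Chars.findFrom_natCast l sub start hst
        by_cases h : PySem.Chars.find (l.drop start) sub = -1
        · rw [hcases, if_pos h]
        · exfalso
          apply hf
          constructor
          · rw [hcases, if_neg h]
            have := PySem.Chars.neg_one_le_find (l.drop start) sub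
            omega
          · exact hms
      have hnoinf : ¬ sub <:+: l.drop start :=
        (PySem.Chars.findFrom_natCast_eq_neg_one_iff l sub start hst).mp hFneg
      rw [scan_nomatch l sub by_ hs start ms hnoinf]
termination_by l.length - start

theorem str_replace_spec : Claim_equal_str_replace := by
  unfold Claim_equal_str_replace Spec_str_replace
  intro input sub by_ ms _
  unfold str_replace str_replace_alt
  by_cases h0 : ms = 0
  · rw [if_pos h0, if_pos h0]
  · rw [if_neg h0, if_neg h0]
    by_cases hsub : sub.toList = []
    · rw [dif_pos hsub, dif_pos hsub]
      have hu : (if 0 < ms ∧ ms < (input.toList.length : Int) + 2 then (ms - 1).toNat else input.toList.length) ≤ input.toList.length := by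
        split <;> omega
      congr 1
      rw [show (fun i => [input.toList.getD i ' ']) = (fun c : Char => [c]) ∘ (fun i => input.toList.getD i ' ') from rfl,
        ← List.map_map, range_map_getD input.toList ' ' _ hu]
      rw [List.append_assoc, List.singleton_append,
        join_cons_of_ne_nil _ _ _ (by simp)]
      simp
    · rw [dif_neg hsub, dif_neg hsub]
      congr 1
      exact loop_eq input.toList sub.toList by_.toList hsub 0 (Nat.zero_le _) ms
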